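-- pv_equiv track=rewrite | github.com/miliar/Code_Jam_Webscraper | solutions_python/solutions_year17_round0_nr3/2181.py | toilet
-- ===== SOURCE A (Python) =====
-- import math
--
-- def toilet(start,end,people):
--     if end - start <= 1:
--         return (0,0)
--     if people == 0:
--         return (0,0)
--     if people == 1:
--         mid = (start+end)//2
--         l = math.ceil((end - start)/2) - 1
--         r = math.floor((end - start)/2) - 1
--         return (l,r)
--     else :
--         mid = (start+end)//2
--         np1 = (people-1)//2
--         np2 = people - np1 -1
--         if (np2>np1):
--             return toilet(mid,end,np2)
--         else:
--             return toilet(start,mid,np1)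
-- ===== SOURCE B (Python) =====
-- def toilet(start, end, people):
--     # Iterative reformulation: thread (start, end, people) through a loop
--     # instead of tail recursion, then compute the final gap halves once.
--     while people >= 2 and end - start > 1:
--         mid = (start + end) // 2
--         np1 = (people - 1) // 2
--         np2 = people - np1 - 1
--         if np2 > np1:
--             start, people = mid, np2
--         else:
--             end, people = mid, np1
--     if people == 1 and end - start > 1:
--         g = end - start
--         return ((g + 1) // 2 - 1, g // 2 - 1)
--     return (0, 0)
-- ===== Notes on version B (the rewrite author's own statement) =====
-- stated objective: simpler
-- what changed: Replaced the multi-base-case tail recursion by an iterative while-loop over the (start,end,people) state with a single final gap computation, and replaced float math.ceil/math.floor by pure integer arithmetic.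
import Mathlib
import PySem

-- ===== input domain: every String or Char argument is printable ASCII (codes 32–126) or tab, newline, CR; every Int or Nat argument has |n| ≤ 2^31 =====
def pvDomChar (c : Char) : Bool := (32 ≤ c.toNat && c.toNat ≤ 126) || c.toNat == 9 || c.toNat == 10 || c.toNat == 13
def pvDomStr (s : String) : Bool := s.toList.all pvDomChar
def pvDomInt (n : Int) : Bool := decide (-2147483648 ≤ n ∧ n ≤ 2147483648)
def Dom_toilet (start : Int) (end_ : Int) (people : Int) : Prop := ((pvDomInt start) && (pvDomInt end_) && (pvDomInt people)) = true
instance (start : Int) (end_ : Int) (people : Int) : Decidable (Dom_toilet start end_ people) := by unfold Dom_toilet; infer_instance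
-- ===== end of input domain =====

-- B rewrites A's tail recursion as an iterative loop over the (start, end, people)
-- state with one final gap computation, using integer arithmetic instead of
-- float math.ceil/math.floor (exact on the stated integer domain).

-- midpoint bounds, cited by the ports' termination proofs
theorem pv_mid_bounds (s e : Int) (h : s + 2 ≤ e) :
    s + 1 ≤ PySem.Int.floordiv (s + e) 2 ∧ PySem.Int.floordiv (s + e) 2 ≤ e - 1 := by
  have h1 := PySem.Int.floordiv_mul_add_mod (s + e) 2
  have h2 := PySem.Int.mod_nonneg (s + e) (b := 2) (by omega)
  have h3 := PySem.Int.mod_lt (s + e) (b := 2) (by omega)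
  omega

-- ===== PORT A =====
-- math.ceil((end-start)/2) and math.floor((end-start)/2) use float division, which is
-- exact on Dom (|end-start| ≤ 2^32 < 2^53); they are ported as the exact integer
-- ceiling/floor of (end_-start)/2.
def toilet (start : Int) (end_ : Int) (people : Int) : Int × Int :=
  if end_ - start ≤ 1 then (0, 0)
  else if people = 0 then (0, 0)
  else if people = 1 then
    (PySem.Int.floordiv (end_ - start + 1) 2 - 1, PySem.Int.floordiv (end_ - start) 2 - 1)
  else
    let mid := PySem.Int.floordiv (start + end_) 2
    let np1 := PySem.Int.floordiv (people - 1) 2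
    let np2 := people - np1 - 1
    if np2 > np1 then toilet mid end_ np2 else toilet start mid np1
termination_by (end_ - start).toNat
decreasing_by
  · have := pv_mid_bounds start end_ (by omega); omega
  · have := pv_mid_bounds start end_ (by omega); omega

-- ===== PORT B =====
-- the while loop of Source B, returning the final (start, end, people) state
def toiletLoop (start : Int) (end_ : Int) (people : Int) : Int × Int × Int :=
  if 2 ≤ people ∧ 1 < end_ - start then
    let mid := PySem.Int.floordiv (start + end_) 2
    let np1 := PySem.Int.floordiv (people - 1) 2
    let np2 := people - np1 - 1
    if np2 > np1 then toiletLoop mid end_ np2 else toiletLoop start mid np1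
  else (start, end_, people)
termination_by (end_ - start).toNat
decreasing_by
  · have := pv_mid_bounds start end_ (by omega); omega
  · have := pv_mid_bounds start end_ (by omega); omega

def toilet_alt (start : Int) (end_ : Int) (people : Int) : Int × Int :=
  let r := toiletLoop start end_ people
  if r.2.2 = 1 ∧ 1 < r.2.1 - r.1 then
    (PySem.Int.floordiv (r.2.1 - r.1 + 1) 2 - 1, PySem.Int.floordiv (r.2.1 - r.1) 2 - 1)
  else (0, 0)

-- ===== PRECONDITION & SPEC =====
def Spec_toilet (start : Int) (end_ : Int) (people : Int) (out : Int × Int) : Prop := out = toilet_alt start end_ people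
instance (start : Int) (end_ : Int) (people : Int) (out : Int × Int) : Decidable (Spec_toilet start end_ people out) := by unfold Spec_toilet; infer_instance

-- ===== CLAIM (what is proved, stated in full; the proofs are below) =====
def Claim_equal_toilet : Prop := ∀ (start : Int) (end_ : Int) (people : Int), Dom_toilet start end_ people → Spec_toilet start end_ people (toilet start end_ people)

-- ===== LEMMAS AND PROOFS =====

-- B returns (0,0) whenever people ≤ -1 (the loop never runs and the final test fails)
theorem alt_neg (s e p : Int) (hp : p ≤ -1) : toilet_alt s e p = (0, 0) := by
  have hl : toiletLoop s e p = (s, e, p) := by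
    rw [toiletLoop, if_neg (by omega : ¬ (2 ≤ p ∧ 1 < e - s))]
  unfold toilet_alt
  rw [hl]
  exact if_neg (by simp; omega)

-- the np chosen in A's recursive branch stays ≤ -1 when people ≤ -1
theorem np_neg (p : Int) (hp : p ≤ -1) :
    PySem.Int.floordiv (p - 1) 2 ≤ -1 ∧ p - PySem.Int.floordiv (p - 1) 2 - 1 ≤ -1 := by
  have h1 := PySem.Int.floordiv_mul_add_mod (p - 1) 2
  have h2 := PySem.Int.mod_nonneg (p - 1) (b := 2) (by omega)
  have h3 := PySem.Int.mod_lt (p - 1) (b := 2) (by omega)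
  omega

theorem A_eq_B : ∀ (n : Nat) (s e p : Int), (e - s).toNat = n →
    toilet s e p = toilet_alt s e p := by
  intro n
  induction n using Nat.strong_induction_on with
  | _ n ih =>
    intro s e p hn
    by_cases h1 : e - s ≤ 1
    · rw [toilet, if_pos h1]
      have hl : toiletLoop s e p = (s, e, p) := by
        rw [toiletLoop, if_neg (by omega : ¬ (2 ≤ p ∧ 1 < e - s))]
      unfold toilet_alt
      rw [hl, if_neg (by simp; omega)]
    · by_cases h0 : p = 0
      · rw [toilet, if_neg h1, if_pos h0]
        have hl : toiletLoop s e p = (s, e, p) := by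
          rw [toiletLoop, if_neg (by omega : ¬ (2 ≤ p ∧ 1 < e - s))]
        unfold toilet_alt
        rw [hl, if_neg (by simp; omega)]
      · by_cases hone : p = 1
        · subst hone
          rw [toilet, if_neg h1, if_neg h0, if_pos rfl]
          have hl : toiletLoop s e 1 = (s, e, 1) := by
            rw [toiletLoop, if_neg (by omega : ¬ ((2:Int) ≤ 1 ∧ 1 < e - s))]
          unfold toilet_alt
          rw [hl, if_pos (by simp; omega)]
        · -- recursive branch of A
          have hmid := pv_mid_bounds s e (by omega)
          rw [toilet, if_neg h1, if_neg h0, if_neg hone]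
          simp only []
          set mid := PySem.Int.floordiv (s + e) 2 with hmiddef
          set np1 := PySem.Int.floordiv (p - 1) 2 with hnp1def
          by_cases hp2 : 2 ≤ p
          · -- the loop performs the same step
            have hl : toiletLoop s e p =
                (if p - np1 - 1 > np1 then toiletLoop mid e (p - np1 - 1)
                 else toiletLoop s mid np1) := by
              rw [toiletLoop, if_pos (by constructor <;> omega : (2 ≤ p ∧ 1 < e - s))]
            by_cases hgt : p - np1 - 1 > np1
            · rw [if_pos hgt]
              have : toilet_alt s e p = toilet_alt mid e (p - np1 - 1) := by
                unfold toilet_alt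
                rw [hl, if_pos hgt]
              rw [this]
              exact ih (e - mid).toNat (by omega) mid e (p - np1 - 1) rfl
            · rw [if_neg hgt]
              have : toilet_alt s e p = toilet_alt s mid np1 := by
                unfold toilet_alt
                rw [hl, if_neg hgt]
              rw [this]
              exact ih (mid - s).toNat (by omega) s mid np1 rfl
          · -- p ≤ -1 : A recurses with a still-negative people, B yields (0,0)
            have hpneg : p ≤ -1 := by omega
            have hnp := np_neg p hpneg
            rw [alt_neg s e p hpneg]
            by_cases hgt : p - np1 - 1 > np1
            · rw [if_pos hgt,
                ih (e - mid).toNat (by omega) mid e (p - np1 - 1) rfl,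
                alt_neg _ _ _ (by omega)]
            · rw [if_neg hgt,
                ih (mid - s).toNat (by omega) s mid np1 rfl,
                alt_neg _ _ _ (by omega)]

-- ===== VERDICT (by name: the statement is the Claim_ definition above) =====
theorem toilet_spec : Claim_equal_toilet := by
  intro s e p _
  unfold Spec_toilet
  exact A_eq_B (e - s).toNat s e p rfl
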